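-- pv_equiv track=rewrite | github.com/JyLIU-emma/MWE_coref | 2_traitements/statistiques.py | span_schema
-- ===== SOURCE A (Python) =====
-- def span_schema(schema):
--     """
--     Récupère les identifiant de début et de fin des éléments d'un schéma.
--
--     Args:
--         schema(liste de str)
--     Returns:
--         liste_ind (liste de liste de int): les identifiants de début et de fin
--         pour chaque partie
--         ex: [*, 1, 1, *] -> [[1,2]]
--             [1, *, 1, 1] -> [[0,0], [2,3]]
--     """
--     encours = False
--     liste_ind = []
--     for indice, element in enumerate(schema):
--         # Début
--         if element != "*" and not encours:
--             # L'élément vient de commencer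
--             encours = True
--             debut = indice
--
--         # Fin
--         if element == "*" and encours:
--             # l'élément vient de se finir
--             encours = False
--             fin = indice - 1
--             liste_ind.append([debut, fin])
--         elif encours and indice == len(schema)-1:
--             # L'élément se finit en même temps que le schema
--             encours = False
--             fin = indice
--             liste_ind.append([debut, fin])
--
--     return liste_ind
-- ===== SOURCE B (Python) =====
-- def span_schema(schema):
--     """Boundary detection in staged passes: a start is a non-star whose left
--     neighbour is a star (or the list edge), an end is a non-star whose right
--     neighbour is a star (or the edge); pair them up with zip."""
--     starts = [i for i, (prev, cur) in enumerate(zip(["*"] + schema, schema))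
--               if prev == "*" and cur != "*"]
--     ends = [i for i, (cur, nxt) in enumerate(zip(schema, schema[1:] + ["*"]))
--             if cur != "*" and nxt == "*"]
--     return [[s, e] for s, e in zip(starts, ends)]
-- ===== Notes on version B (the rewrite author's own statement) =====
-- stated objective: alternative
-- what changed: Replaces A's single-pass boolean state machine (encours/debut flags) by staged boundary detection: one pass over (predecessor, element) pairs collects run starts, one pass over (element, successor) pairs collects run ends, and the two index lists are zipped into spans.
import Mathlib
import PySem

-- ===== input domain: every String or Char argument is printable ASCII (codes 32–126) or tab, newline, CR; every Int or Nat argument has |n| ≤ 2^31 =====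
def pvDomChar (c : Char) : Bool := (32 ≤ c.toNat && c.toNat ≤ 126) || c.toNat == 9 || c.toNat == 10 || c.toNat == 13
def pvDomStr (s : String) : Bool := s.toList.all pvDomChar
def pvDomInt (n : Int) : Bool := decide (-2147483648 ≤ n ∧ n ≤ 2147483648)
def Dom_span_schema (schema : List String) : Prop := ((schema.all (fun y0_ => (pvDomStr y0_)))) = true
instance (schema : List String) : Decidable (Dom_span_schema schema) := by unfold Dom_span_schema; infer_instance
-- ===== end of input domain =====

-- B replaces A's single-pass boolean state machine by staged boundary detection
-- (run starts from (prev, cur) pairs, run ends from (cur, next) pairs, zipped); objective: alternative, same O(n) cost.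

-- ===== PORT A =====
-- one loop iteration of A: state (encours, debut, liste_ind), element (indice, element); n = len(schema)
def stepA (n : Int) (st : Bool × Int × List (List Int)) (p : Int × String) : Bool × Int × List (List Int) :=
  let encours := st.1
  let debut := st.2.1
  let liste := st.2.2
  -- if element != "*" and not encours: encours = True; debut = indice
  let encours' := if p.2 ≠ "*" ∧ encours = false then true else encours
  let debut' := if p.2 ≠ "*" ∧ encours = false then p.1 else debut
  -- if element == "*" and encours: append [debut, indice-1]
  if p.2 = "*" ∧ encours' = true then (false, debut', liste ++ [[debut', p.1 - 1]])
  -- elif encours and indice == len(schema)-1: append [debut, indice]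
  else if encours' = true ∧ p.1 = n - 1 then (false, debut', liste ++ [[debut', p.1]])
  else (encours', debut', liste)

def span_schema (schema : List String) : List (List Int) :=
  ((PySem.List.enumerate schema).foldl (stepA (schema.length : Int)) (false, 0, [])).2.2

-- ===== PORT B =====
-- starts = [i for i,(prev,cur) in enumerate(zip(["*"]+schema, schema)) if prev=="*" and cur!="*"]
-- ends   = [i for i,(cur,nxt) in enumerate(zip(schema, schema[1:]+["*"])) if cur!="*" and nxt=="*"]
-- return [[s,e] for s,e in zip(starts, ends)]
def span_schema_alt (schema : List String) : List (List Int) :=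
  let starts := ((PySem.List.enumerate (("*" :: schema).zip schema)).filter
      (fun p => p.2.1 == "*" && p.2.2 != "*")).map (·.1)
  let ends := ((PySem.List.enumerate (schema.zip (schema.drop 1 ++ ["*"]))).filter
      (fun p => p.2.1 != "*" && p.2.2 == "*")).map (·.1)
  (starts.zip ends).map (fun p => [p.1, p.2])

-- ===== PRECONDITION & SPEC =====
def Spec_span_schema (schema : List String) (out : List (List Int)) : Prop := out = span_schema_alt schema
instance (schema : List String) (out : List (List Int)) : Decidable (Spec_span_schema schema out) := by unfold Spec_span_schema; infer_instance

-- ===== CLAIM (what is proved, stated in full; the proofs are below) =====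
def Claim_equal_span_schema : Prop := ∀ (schema : List String), Dom_span_schema schema → Spec_span_schema schema (span_schema schema)

-- ===== LEMMAS AND PROOFS =====

-- run-length encoding of the key sequence (common characterization of both ports)
def pvRuns : List Bool → List (Bool × Int)
  | [] => []
  | k :: rest =>
      (k, 1 + ((rest.takeWhile (· == k)).length : Int)) :: pvRuns (rest.dropWhile (· == k))
termination_by l => l.length
decreasing_by
  simpa using Nat.lt_succ_of_le (List.length_dropWhile_le _ _)

-- spans emitted from the runs, running index idx
def pvGoB : List (Bool × Int) → Int → List (List Int)
  | [], _ => []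
  | (k, n) :: rest, idx => (if k then [[idx, idx + n - 1]] else []) ++ pvGoB rest (idx + n)

-- start indices / end indices of the true runs
def pvSOR : List (Bool × Int) → Int → List Int
  | [], _ => []
  | (k, n) :: rest, idx => (if k then [idx] else []) ++ pvSOR rest (idx + n)

def pvEOR : List (Bool × Int) → Int → List Int
  | [], _ => []
  | (k, n) :: rest, idx => (if k then [idx + n - 1] else []) ++ pvEOR rest (idx + n)

-- B's two comprehensions, generalized over the previous element and the base index
def pvSt (prev : String) (s : List String) (i : Int) : List Int :=
  ((PySem.List.enumerate ((prev :: s).zip s) i).filter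
      (fun p => p.2.1 == "*" && p.2.2 != "*")).map (·.1)

def pvEn (s : List String) (i : Int) : List Int :=
  ((PySem.List.enumerate (s.zip (s.drop 1 ++ ["*"])) i).filter
      (fun p => p.2.1 != "*" && p.2.2 == "*")).map (·.1)

theorem pvSt_nil (prev : String) (i : Int) : pvSt prev [] i = [] := by
  simp [pvSt]

theorem pvSt_cons (prev c : String) (rest : List String) (i : Int) :
    pvSt prev (c :: rest) i
      = (if prev = "*" ∧ c ≠ "*" then [i] else []) ++ pvSt c rest (i + 1) := by
  simp only [pvSt, List.zip_cons_cons, PySem.List.enumerate_cons, List.filter_cons]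
  by_cases h1 : prev = "*" <;> by_cases h2 : c = "*" <;> simp [h1, h2]

theorem pvEn_cons (c : String) (rest : List String) (i : Int) :
    pvEn (c :: rest) i
      = (if c ≠ "*" ∧ (rest.headD "*") = "*" then [i] else []) ++ pvEn rest (i + 1) := by
  cases rest with
  | nil =>
    simp only [pvEn, List.drop, List.nil_append, List.zip_cons_cons, List.zip_nil_left,
      PySem.List.enumerate_cons, PySem.List.enumerate_nil, List.filter_cons, List.headD]
    by_cases h : c = "*" <;> simp [h]
  | cons d r =>
    simp only [pvEn, List.drop, List.cons_append, List.zip_cons_cons,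
      PySem.List.enumerate_cons, List.filter_cons, List.headD]
    by_cases h1 : c = "*" <;> by_cases h2 : d = "*" <;> simp [h1, h2]

theorem goB_false_cons (l : List Bool) (i : Int) :
    pvGoB (pvRuns (false :: l)) i = pvGoB (pvRuns l) (i + 1) := by
  cases l with
  | nil => simp [pvRuns, pvGoB]
  | cons b l' =>
    cases b with
    | false =>
      simp only [pvRuns, pvGoB, List.takeWhile, List.dropWhile]
      simp
      ring_nf
    | true =>
      simp [pvRuns, pvGoB, List.takeWhile, List.dropWhile]

theorem sOR_false_cons (l : List Bool) (i : Int) :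
    pvSOR (pvRuns (false :: l)) i = pvSOR (pvRuns l) (i + 1) := by
  cases l with
  | nil => simp [pvRuns, pvSOR]
  | cons b l' =>
    cases b with
    | false =>
      simp only [pvRuns, pvSOR, List.takeWhile, List.dropWhile]
      simp
      ring_nf
    | true =>
      simp [pvRuns, pvSOR, List.takeWhile, List.dropWhile]

theorem eOR_false_cons (l : List Bool) (i : Int) :
    pvEOR (pvRuns (false :: l)) i = pvEOR (pvRuns l) (i + 1) := by
  cases l with
  | nil => simp [pvRuns, pvEOR]
  | cons b l' =>
    cases b with
    | false =>
      simp only [pvRuns, pvEOR, List.takeWhile, List.dropWhile]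
      simp
      ring_nf
    | true =>
      simp [pvRuns, pvEOR, List.takeWhile, List.dropWhile]

theorem eOR_true_true (l : List Bool) (i : Int) :
    pvEOR (pvRuns (true :: true :: l)) i = pvEOR (pvRuns (true :: l)) (i + 1) := by
  simp only [pvRuns, pvEOR, List.takeWhile, List.dropWhile]
  simp
  constructor
  · ring_nf
  · ring_nf

-- zipping starts with ends rebuilds the spans
theorem zip_sOR_eOR (rs : List (Bool × Int)) (i : Int) :
    ((pvSOR rs i).zip (pvEOR rs i)).map (fun p => [p.1, p.2]) = pvGoB rs i := by
  induction rs generalizing i with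
  | nil => simp [pvSOR, pvEOR, pvGoB]
  | cons kn rest ih =>
    obtain ⟨k, n⟩ := kn
    cases k with
    | false => simpa [pvSOR, pvEOR, pvGoB] using ih (i + n)
    | true => simpa [pvSOR, pvEOR, pvGoB] using ih (i + n)

-- B's starts-comprehension computes the run starts
theorem starts_inv (s : List String) :
    ∀ (i : Int),
      (pvSt "*" s i = pvSOR (pvRuns (s.map (fun e => e ≠ "*"))) i)
      ∧ (∀ c : String, c ≠ "*" →
          pvSt c s i
            = pvSOR (pvRuns ((s.dropWhile (fun e => e ≠ "*")).map (fun e => e ≠ "*")))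
                    (i + ((s.takeWhile (fun e => e ≠ "*")).length : Int))) := by
  induction s with
  | nil =>
    intro i
    constructor
    · simp [pvSt_nil, pvRuns, pvSOR]
    · intro c _; simp [pvSt_nil, pvRuns, pvSOR]
  | cons e rest ih =>
    intro i
    constructor
    · by_cases he : e = "*"
      · subst he
        rw [pvSt_cons]
        have := (ih (i + 1)).1
        simp only [this]
        have hmap : (("*" : String) :: rest).map (fun e => decide (e ≠ "*"))
            = false :: rest.map (fun e => decide (e ≠ "*")) := by simp
        rw [hmap, sOR_false_cons]
        simp
      · rw [pvSt_cons]
        have hopen := (ih (i + 1)).2 e he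
        simp only [hopen]
        have hmap : (e :: rest).map (fun e => decide (e ≠ "*"))
            = true :: rest.map (fun e => decide (e ≠ "*")) := by simp [he]
        rw [hmap, pvRuns]
        have hpred : ((· == true) ∘ fun e : String => decide (e ≠ "*"))
            = fun e : String => decide (e ≠ "*") := by funext x; simp
        have htk : (rest.map (fun e => decide (e ≠ "*"))).takeWhile (· == true)
            = (rest.takeWhile (fun e => decide (e ≠ "*"))).map (fun e => decide (e ≠ "*")) := by
          rw [List.takeWhile_map, hpred]
        have hdw : (rest.map (fun e => decide (e ≠ "*"))).dropWhile (· == true)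
            = (rest.dropWhile (fun e => decide (e ≠ "*"))).map (fun e => decide (e ≠ "*")) := by
          rw [List.dropWhile_map, hpred]
        rw [htk, hdw]
        simp [pvSOR, he]
        ring_nf
    · intro c hc
      rw [pvSt_cons]
      by_cases he : e = "*"
      · subst he
        have := (ih (i + 1)).1
        simp only [hc, this]
        simp only [List.takeWhile, List.dropWhile]
        simp
        exact (sOR_false_cons _ i).symm
      · have hopen := (ih (i + 1)).2 e he
        simp only [hopen]
        simp [List.takeWhile, List.dropWhile, he, hc]
        ring_nf

-- B's ends-comprehension computes the run ends
theorem ends_inv (s : List String) :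
    ∀ (i : Int), pvEn s i = pvEOR (pvRuns (s.map (fun e => e ≠ "*"))) i := by
  induction s with
  | nil => intro i; simp [pvEn, pvRuns, pvEOR]
  | cons c rest ih =>
    intro i
    rw [pvEn_cons, ih (i + 1)]
    by_cases hc : c = "*"
    · subst hc
      have hmap : (("*" : String) :: rest).map (fun e => decide (e ≠ "*"))
          = false :: rest.map (fun e => decide (e ≠ "*")) := by simp
      rw [hmap, eOR_false_cons]
      simp
    · cases rest with
      | nil =>
        simp [hc, pvRuns, pvEOR, List.headD]
      | cons d r =>
        by_cases hd : d = "*"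
        · subst hd
          simp only [List.headD]
          have hmap : (c :: ("*" : String) :: r).map (fun e => decide (e ≠ "*"))
              = true :: false :: r.map (fun e => decide (e ≠ "*")) := by simp [hc]
          rw [hmap]
          simp only [pvRuns, pvEOR, List.takeWhile, List.dropWhile]
          simp [hc]
        · simp only [List.headD, hd]
          have hmap : (c :: d :: r).map (fun e => decide (e ≠ "*"))
              = true :: true :: r.map (fun e => decide (e ≠ "*")) := by simp [hc, hd]
          have hmap2 : (d :: r).map (fun e => decide (e ≠ "*"))
              = true :: r.map (fun e => decide (e ≠ "*")) := by simp [hd]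
          rw [hmap, hmap2, eOR_true_true]
          simp [hc]

-- B equals the run characterization
theorem B_char (schema : List String) :
    span_schema_alt schema = pvGoB (pvRuns (schema.map (fun e => e ≠ "*"))) 0 := by
  have hs : span_schema_alt schema
      = ((pvSt "*" schema 0).zip (pvEn schema 0)).map (fun p => [p.1, p.2]) := rfl
  rw [hs, (starts_inv schema 0).1, ends_inv schema 0, zip_sOR_eOR]

-- A equals the run characterization: loop invariant over A's fold
theorem main_inv (n : Int) (s : List String) :
    ∀ (i : Int) (acc : List (List Int)), i + (s.length : Int) = n →
    ((∀ d : Int,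
        ((PySem.List.enumerate s i).foldl (stepA n) (false, d, acc)).2.2
          = acc ++ pvGoB (pvRuns (s.map (fun e => e ≠ "*"))) i)
     ∧ (∀ db : Int, s ≠ [] →
        ((PySem.List.enumerate s i).foldl (stepA n) (true, db, acc)).2.2
          = acc ++ [[db, i + ((s.takeWhile (fun e => e ≠ "*")).length : Int) - 1]]
              ++ pvGoB (pvRuns ((s.dropWhile (fun e => e ≠ "*")).map (fun e => e ≠ "*")))
                       (i + ((s.takeWhile (fun e => e ≠ "*")).length : Int)))) := by
  induction s with
  | nil =>
    intro i acc _
    constructor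
    · intro d; simp [PySem.List.enumerate, pvRuns, pvGoB]
    · intro db h; exact absurd rfl h
  | cons e rest ih =>
    intro i acc hn
    have hn' : (i + 1) + (rest.length : Int) = n := by
      simp at hn; omega
    constructor
    · -- closed state
      intro d
      by_cases he : e = "*"
      · -- star while closed: no-op step
        subst he
        rw [PySem.List.enumerate_cons, List.foldl_cons]
        have hstep : stepA n (false, d, acc) (i, "*") = (false, d, acc) := by
          simp [stepA]
        rw [hstep, (ih (i + 1) acc hn').1 d]
        simp [goB_false_cons]
      · -- non-star while closed: open a run at i
        rw [PySem.List.enumerate_cons, List.foldl_cons]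
        rcases eq_or_ne rest ([] : List String) with hr | hr
        · -- last element: closes immediately
          subst hr
          have hi : i = n - 1 := by simp at hn; omega
          have hstep : stepA n (false, d, acc) (i, e) = (false, i, acc ++ [[i, i]]) := by
            simp [stepA, he, hi]
          rw [hstep]
          simp [PySem.List.enumerate, pvRuns, pvGoB, he]
        · -- run continues
          have hi : i ≠ n - 1 := by
            have : (1 : Int) ≤ (rest.length : Int) := by
              have := List.length_pos_iff.mpr hr; exact_mod_cast this
            omega
          have hstep : stepA n (false, d, acc) (i, e) = (true, i, acc) := by
            simp [stepA, he, hi]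
          rw [hstep, ((ih (i + 1) acc hn').2 i hr)]
          have hmap : (e :: rest).map (fun e => decide (e ≠ "*"))
              = true :: rest.map (fun e => decide (e ≠ "*")) := by
            simp [he]
          rw [hmap, pvRuns]
          have hpred : ((· == true) ∘ fun e : String => decide (e ≠ "*"))
              = fun e : String => decide (e ≠ "*") := by
            funext x
            simp
          have htk : (rest.map (fun e => decide (e ≠ "*"))).takeWhile (· == true)
              = (rest.takeWhile (fun e => decide (e ≠ "*"))).map (fun e => decide (e ≠ "*")) := by
            rw [List.takeWhile_map, hpred]
          have hdw : (rest.map (fun e => decide (e ≠ "*"))).dropWhile (· == true)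
              = (rest.dropWhile (fun e => decide (e ≠ "*"))).map (fun e => decide (e ≠ "*")) := by
            rw [List.dropWhile_map, hpred]
          rw [htk, hdw]
          simp [pvGoB]
          constructor
          · ring_nf
          · ring_nf
    · -- open state with start db
      intro db _
      by_cases he : e = "*"
      · -- star closes the run at i-1
        subst he
        rw [PySem.List.enumerate_cons, List.foldl_cons]
        have hstep : stepA n (true, db, acc) (i, "*") = (false, db, acc ++ [[db, i - 1]]) := by
          simp [stepA]
        rw [hstep, (ih (i + 1) (acc ++ [[db, i - 1]]) hn').1 db]
        simp [List.takeWhile, List.dropWhile, goB_false_cons]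
      · rw [PySem.List.enumerate_cons, List.foldl_cons]
        rcases eq_or_ne rest ([] : List String) with hr | hr
        · -- last element: closes at i
          subst hr
          have hi : i = n - 1 := by simp at hn; omega
          have hstep : stepA n (true, db, acc) (i, e) = (false, db, acc ++ [[db, i]]) := by
            simp [stepA, he, hi]
          rw [hstep]
          simp [PySem.List.enumerate, List.takeWhile, List.dropWhile, he, pvRuns, pvGoB]
        · -- run continues
          have hi : i ≠ n - 1 := by
            have : (1 : Int) ≤ (rest.length : Int) := by
              have := List.length_pos_iff.mpr hr; exact_mod_cast this
            omega
          have hstep : stepA n (true, db, acc) (i, e) = (true, db, acc) := by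
            simp [stepA, he, hi]
          rw [hstep, ((ih (i + 1) acc hn').2 db hr)]
          simp [List.takeWhile, List.dropWhile, he]
          constructor
          · ring_nf
          · ring_nf

-- ===== VERDICT (by name: the statement is the Claim_ definition above) =====
theorem span_schema_spec : Claim_equal_span_schema := by
  intro schema _
  unfold Spec_span_schema span_schema
  rw [B_char]
  exact (main_inv (schema.length : Int) schema 0 [] (by simp)).1 0
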